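-- pv_equiv track=rewrite | github.com/AnonShield/tool | benchmark/ocr/report.py | _char_substitutions
-- ===== SOURCE A (Python) =====
-- from collections import Counter
--
-- def _char_substitutions(ref: str, hyp: str) -> Counter:
--     """Extract character-level substitution pairs via traceback of Levenshtein DP."""
--     m, n = len(ref), len(hyp)
--     dp = [[0] * (n + 1) for _ in range(m + 1)]
--     for i in range(m + 1):
--         dp[i][0] = i
--     for j in range(n + 1):
--         dp[0][j] = j
--     for i in range(1, m + 1):
--         for j in range(1, n + 1):
--             if ref[i - 1] == hyp[j - 1]:
--                 dp[i][j] = dp[i - 1][j - 1]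
--             else:
--                 dp[i][j] = 1 + min(dp[i - 1][j], dp[i][j - 1], dp[i - 1][j - 1])
--
--     pairs: Counter = Counter()
--     i, j = m, n
--     while i > 0 and j > 0:
--         if ref[i - 1] == hyp[j - 1]:
--             i -= 1; j -= 1
--         elif dp[i][j] == dp[i - 1][j - 1] + 1:
--             pairs[(ref[i - 1], hyp[j - 1])] += 1
--             i -= 1; j -= 1
--         elif dp[i][j] == dp[i - 1][j] + 1:
--             i -= 1   # deletion
--         else:
--             j -= 1   # insertion
--     return pairs
-- ===== SOURCE B (Python) =====
-- from collections import Counter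
--
-- def _char_substitutions(ref: str, hyp: str) -> Counter:
--     """Forward Levenshtein pass over two rows: each cell carries (cost, persistent
--     cons-list of substitution pairs along the locally-chosen optimal path, most
--     recent first).  No table is kept and no traceback is run; the answer is the
--     path list at the final cell, counted at the end."""
--     m, n = len(ref), len(hyp)
--     prev = [(j, None) for j in range(n + 1)]  # cons list: None | (pair, tail)
--     for i in range(1, m + 1):
--         cur = [(i, None)]
--         for j in range(1, n + 1):
--             diag, diag_l = prev[j - 1]
--             up, up_l = prev[j]
--             left, left_l = cur[j - 1]
--             if ref[i - 1] == hyp[j - 1]: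
--                 cur.append((diag, diag_l))
--             else:
--                 v = 1 + min(up, left, diag)
--                 if v == diag + 1:
--                     cur.append((v, ((ref[i - 1], hyp[j - 1]), diag_l)))
--                 elif v == up + 1:
--                     cur.append((v, up_l))
--                 else:
--                     cur.append((v, left_l))
--         prev = cur
--     pairs: Counter = Counter()
--     node = prev[n][1]
--     while node is not None:
--         pairs[node[0]] += 1
--         node = node[1]
--     return pairs
-- ===== Notes on version B (the rewrite author's own statement) =====
-- stated objective: alternative
-- what changed: B replaces the full DP table plus backward traceback with a single forward two-row pass in which every cell carries (cost, persistent cons-list of substitution pairs of its locally chosen optimal path); the answer is counted from the final cell's list, so no table is stored and no traceback loop exists.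
import Mathlib
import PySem

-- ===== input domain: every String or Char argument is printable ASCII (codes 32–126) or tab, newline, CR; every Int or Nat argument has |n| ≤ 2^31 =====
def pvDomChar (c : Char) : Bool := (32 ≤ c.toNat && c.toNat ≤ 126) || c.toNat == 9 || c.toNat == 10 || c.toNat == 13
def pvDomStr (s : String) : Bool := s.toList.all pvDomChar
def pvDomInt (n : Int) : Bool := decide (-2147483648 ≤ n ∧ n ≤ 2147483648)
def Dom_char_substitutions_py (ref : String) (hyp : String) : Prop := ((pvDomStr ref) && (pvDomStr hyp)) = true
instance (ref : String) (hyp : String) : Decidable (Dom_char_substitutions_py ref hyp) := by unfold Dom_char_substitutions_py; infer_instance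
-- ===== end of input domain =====

-- B drops A's stored table and backward traceback: a forward two-row pass whose cells carry
-- (cost, cons-list of the substitution pairs of the locally chosen optimal path); the final
-- cell's list is counted at the end.

-- ===== PORT A =====
-- inner fill loop of one dp row: walks hyp; p0/p1 are dp[i-1][j-1]/dp[i-1][j], left is dp[i][j-1]
def pvFillRowA (c : Char) : List Char → List Int → Int → List Int
  | h :: hs, p0 :: p1 :: ps, left =>
      let v := if c = h then p0 else 1 + min (min p1 left) p0
      v :: pvFillRowA c hs (p1 :: ps) v
  | _, _, _ => []

-- outer fill loop: one row per ref char, starting with dp[i][0] = i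
def pvRowsA (hcs : List Char) : List Char → List Int → Int → List (List Int)
  | c :: cs, prev, i =>
      let r := i :: pvFillRowA c hcs prev i
      r :: pvRowsA hcs cs r (i + 1)
  | [], _, _ => []

def pvTableA (ref hyp : String) : List (List Int) :=
  let hcs := hyp.toList
  let row0 : List Int := (List.range (hcs.length + 1)).map (fun j => (j : Int))
  row0 :: pvRowsA hcs ref.toList row0 1

def pvDpA (T : List (List Int)) (i j : Nat) : Int := (T.getD i []).getD j 0

-- the while-loop traceback, comparing dp values (branch order exactly as in A)
def pvTraceA (rcs hcs : List Char) (T : List (List Int)) :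
    Nat → Nat → PySem.Dict (String × String) Int → PySem.Dict (String × String) Int
  | i + 1, j + 1, d =>
      if rcs.getD i ' ' = hcs.getD j ' ' then pvTraceA rcs hcs T i j d
      else if pvDpA T (i+1) (j+1) = pvDpA T i j + 1 then
        let k := (String.singleton (rcs.getD i ' '), String.singleton (hcs.getD j ' '))
        pvTraceA rcs hcs T i j (d.insert k (d.getD k 0 + 1))
      else if pvDpA T (i+1) (j+1) = pvDpA T i (j+1) + 1 then
        pvTraceA rcs hcs T i (j+1) d
      else
        pvTraceA rcs hcs T (i+1) j d
  | _, _, d => d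
  termination_by i j _ => i + j

def char_substitutions_py (ref : String) (hyp : String) : List (String × String × Int) :=
  let rcs := ref.toList
  let hcs := hyp.toList
  (pvTraceA rcs hcs (pvTableA ref hyp) rcs.length hcs.length PySem.Dict.empty).items.map
    (fun kv => (kv.1.1, kv.1.2, kv.2))

-- ===== PORT B =====
-- each cell carries (cost, cons-list of substitution pairs of its path, most recent first)
def pvFillRowC (c : Char) : List Char → List (Int × List (String × String)) → Int →
    List (String × String) → List (Int × List (String × String))
  | h :: hs, (p0, l0) :: (p1, l1) :: ps, left, leftl =>
      let cell : Int × List (String × String) :=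
        if c = h then (p0, l0)
        else
          let v := 1 + min (min p1 left) p0
          (v, if v = p0 + 1 then (String.singleton c, String.singleton h) :: l0
              else if v = p1 + 1 then l1 else leftl)
      cell :: pvFillRowC c hs ((p1, l1) :: ps) cell.1 cell.2
  | _, _, _, _ => []

def pvRowsC (hcs : List Char) : List Char → List (Int × List (String × String)) → Int →
    List (List (Int × List (String × String)))
  | c :: cs, prev, i =>
      let r := ((i : Int), ([] : List (String × String))) :: pvFillRowC c hcs prev i []
      r :: pvRowsC hcs cs r (i + 1)
  | [], _, _ => []

def pvTableC (ref hyp : String) : List (List (Int × List (String × String))) :=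
  let hcs := hyp.toList
  let row0 : List (Int × List (String × String)) :=
    (List.range (hcs.length + 1)).map (fun j => ((j : Int), ([] : List (String × String))))
  row0 :: pvRowsC hcs ref.toList row0 1

def pvCellC (T : List (List (Int × List (String × String)))) (i j : Nat) :
    Int × List (String × String) :=
  (T.getD i []).getD j ((0 : Int), ([] : List (String × String)))

-- final counting pass over the final cell's path list (the Python while-loop over the cons list)
def char_substitutions_py_alt (ref : String) (hyp : String) : List (String × String × Int) :=
  ((pvCellC (pvTableC ref hyp) ref.toList.length hyp.toList.length).2.foldl
      (fun d p => d.insert p (d.getD p 0 + 1))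
      (PySem.Dict.empty : PySem.Dict (String × String) Int)).items.map
    (fun kv => (kv.1.1, kv.1.2, kv.2))

-- ===== PRECONDITION & SPEC =====
def Spec_char_substitutions_py (ref : String) (hyp : String) (out : List (String × String × Int)) : Prop := out = char_substitutions_py_alt ref hyp
instance (ref : String) (hyp : String) (out : List (String × String × Int)) : Decidable (Spec_char_substitutions_py ref hyp out) := by unfold Spec_char_substitutions_py; infer_instance

-- ===== CLAIM (what is proved, stated in full; the proofs are below) =====
def Claim_equal_char_substitutions_py : Prop := ∀ (ref : String) (hyp : String), Dom_char_substitutions_py ref hyp → Spec_char_substitutions_py ref hyp (char_substitutions_py ref hyp)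

-- ===== LEMMAS AND PROOFS =====

theorem pvFillRowA_length (c : Char) : ∀ (hcs : List Char) (prev : List Int) (left : Int),
    hcs.length + 1 ≤ prev.length → (pvFillRowA c hcs prev left).length = hcs.length := by
  intro hcs
  induction hcs with
  | nil => intro prev left _; simp [pvFillRowA]
  | cons h hs ih =>
    intro prev left hlen
    match prev with
    | [] => simp at hlen
    | [p0] => simp at hlen
    | p0 :: p1 :: ps =>
      simp only [List.length_cons] at hlen ⊢
      rw [show pvFillRowA c (h :: hs) (p0 :: p1 :: ps) left =
        (if c = h then p0 else 1 + min (min p1 left) p0) ::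
          pvFillRowA c hs (p1 :: ps) (if c = h then p0 else 1 + min (min p1 left) p0) from rfl]
      simp only [List.length_cons]
      rw [ih (p1 :: ps) _ (by simp; omega)]

theorem pvFillRowA_getD (c : Char) : ∀ (hcs : List Char) (prev : List Int) (left : Int) (j : Nat),
    hcs.length + 1 ≤ prev.length → j < hcs.length →
    (pvFillRowA c hcs prev left).getD j 0 =
      if c = hcs.getD j ' ' then prev.getD j 0
      else 1 + min (min (prev.getD (j+1) 0)
            (if j = 0 then left else (pvFillRowA c hcs prev left).getD (j-1) 0)) (prev.getD j 0) := by
  intro hcs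
  induction hcs with
  | nil => intro prev left j _ hj; simp at hj
  | cons h hs ih =>
    intro prev left j hlen hj
    match prev with
    | [] => simp at hlen
    | [p0] => simp at hlen
    | p0 :: p1 :: ps =>
      simp only [List.length_cons] at hlen
      rw [show pvFillRowA c (h :: hs) (p0 :: p1 :: ps) left =
        (if c = h then p0 else 1 + min (min p1 left) p0) ::
          pvFillRowA c hs (p1 :: ps) (if c = h then p0 else 1 + min (min p1 left) p0) from rfl]
      cases j with
      | zero => simp
      | succ k =>
        have hk : k < hs.length := by simpa using hj
        rw [List.getD_cons_succ, ih (p1 :: ps) _ k (by simp; omega) hk]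
        cases k with
        | zero => simp
        | succ k' => simp

theorem pvRowsA_chain (hcs : List Char) : ∀ (k : Nat) (cs : List Char) (prev : List Int) (i0 : Int),
    k < cs.length →
    (pvRowsA hcs cs prev i0).getD k [] =
      (i0 + k) :: pvFillRowA (cs.getD k ' ') hcs ((prev :: pvRowsA hcs cs prev i0).getD k []) (i0 + k) := by
  intro k
  induction k with
  | zero =>
    intro cs prev i0 hk
    match cs with
    | c :: cs' => simp [pvRowsA]
  | succ k ih =>
    intro cs prev i0 hk
    match cs with
    | c :: cs' =>
      have hk' : k < cs'.length := by simpa using hk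
      rw [show pvRowsA hcs (c :: cs') prev i0 =
        (i0 :: pvFillRowA c hcs prev i0) :: pvRowsA hcs cs' (i0 :: pvFillRowA c hcs prev i0) (i0 + 1) from rfl]
      rw [List.getD_cons_succ, ih cs' _ (i0 + 1) hk']
      have : i0 + 1 + (k : Int) = i0 + ((k : Nat) + 1 : Nat) := by push_cast; ring
      rw [this]
      rfl

theorem pvFillRowC_fst (c : Char) : ∀ (hcs : List Char) (prev : List (Int × List (String × String)))
    (left : Int) (leftl : List (String × String)),
    (pvFillRowC c hcs prev left leftl).map Prod.fst = pvFillRowA c hcs (prev.map Prod.fst) left := by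
  intro hcs
  induction hcs with
  | nil => intro prev left leftl; simp [pvFillRowC, pvFillRowA]
  | cons h hs ih =>
    intro prev left leftl
    match prev with
    | [] => simp [pvFillRowC, pvFillRowA]
    | [(p0, l0)] => simp [pvFillRowC, pvFillRowA]
    | (p0, l0) :: (p1, l1) :: ps =>
      rw [show pvFillRowC c (h :: hs) ((p0, l0) :: (p1, l1) :: ps) left leftl =
        (if c = h then (p0, l0) else
          (1 + min (min p1 left) p0,
            if 1 + min (min p1 left) p0 = p0 + 1 then (String.singleton c, String.singleton h) :: l0
            else if 1 + min (min p1 left) p0 = p1 + 1 then l1 else leftl))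
          :: pvFillRowC c hs ((p1, l1) :: ps)
            (if c = h then (p0, l0) else
              (1 + min (min p1 left) p0,
                if 1 + min (min p1 left) p0 = p0 + 1 then (String.singleton c, String.singleton h) :: l0
                else if 1 + min (min p1 left) p0 = p1 + 1 then l1 else leftl)).1
            (if c = h then (p0, l0) else
              (1 + min (min p1 left) p0,
                if 1 + min (min p1 left) p0 = p0 + 1 then (String.singleton c, String.singleton h) :: l0
                else if 1 + min (min p1 left) p0 = p1 + 1 then l1 else leftl)).2 from rfl]
      rw [show pvFillRowA c (h :: hs) (((p0, l0) :: (p1, l1) :: ps).map Prod.fst) left =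
        (if c = h then p0 else 1 + min (min p1 left) p0) ::
          pvFillRowA c hs (p1 :: ps.map Prod.fst) (if c = h then p0 else 1 + min (min p1 left) p0) from rfl]
      by_cases hc : c = h
      · subst hc; simp [ih]
      · simp [hc, ih]

theorem pvFillRowC_getD (c : Char) : ∀ (hcs : List Char) (prev : List (Int × List (String × String)))
    (left : Int) (leftl : List (String × String)) (j : Nat),
    hcs.length + 1 ≤ prev.length → j < hcs.length →
    (pvFillRowC c hcs prev left leftl).getD j (0, []) =
      if c = hcs.getD j ' ' then prev.getD j (0, [])
      else
        (1 + min (min ((prev.getD (j+1) (0,[])).1)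
            (if j = 0 then left else ((pvFillRowC c hcs prev left leftl).getD (j-1) (0,[])).1)) ((prev.getD j (0,[])).1),
         if 1 + min (min ((prev.getD (j+1) (0,[])).1)
            (if j = 0 then left else ((pvFillRowC c hcs prev left leftl).getD (j-1) (0,[])).1)) ((prev.getD j (0,[])).1)
              = (prev.getD j (0,[])).1 + 1 then
            (String.singleton c, String.singleton (hcs.getD j ' ')) :: (prev.getD j (0,[])).2
         else if 1 + min (min ((prev.getD (j+1) (0,[])).1)
            (if j = 0 then left else ((pvFillRowC c hcs prev left leftl).getD (j-1) (0,[])).1)) ((prev.getD j (0,[])).1)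
              = (prev.getD (j+1) (0,[])).1 + 1 then (prev.getD (j+1) (0,[])).2
         else (if j = 0 then leftl else ((pvFillRowC c hcs prev left leftl).getD (j-1) (0,[])).2)) := by
  intro hcs
  induction hcs with
  | nil => intro prev left leftl j _ hj; simp at hj
  | cons h hs ih =>
    intro prev left leftl j hlen hj
    match prev with
    | [] => simp at hlen
    | [(p0, l0)] => simp at hlen
    | (p0, l0) :: (p1, l1) :: ps =>
      simp only [List.length_cons] at hlen
      rw [show pvFillRowC c (h :: hs) ((p0, l0) :: (p1, l1) :: ps) left leftl =
        (if c = h then (p0, l0) else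
          (1 + min (min p1 left) p0,
            if 1 + min (min p1 left) p0 = p0 + 1 then (String.singleton c, String.singleton h) :: l0
            else if 1 + min (min p1 left) p0 = p1 + 1 then l1 else leftl))
          :: pvFillRowC c hs ((p1, l1) :: ps)
            (if c = h then (p0, l0) else
              (1 + min (min p1 left) p0,
                if 1 + min (min p1 left) p0 = p0 + 1 then (String.singleton c, String.singleton h) :: l0
                else if 1 + min (min p1 left) p0 = p1 + 1 then l1 else leftl)).1
            (if c = h then (p0, l0) else
              (1 + min (min p1 left) p0,
                if 1 + min (min p1 left) p0 = p0 + 1 then (String.singleton c, String.singleton h) :: l0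
                else if 1 + min (min p1 left) p0 = p1 + 1 then l1 else leftl)).2 from rfl]
      cases j with
      | zero =>
        by_cases hc : c = h <;> simp [hc]
      | succ k =>
        have hk : k < hs.length := by simpa using hj
        rw [List.getD_cons_succ, ih ((p1, l1) :: ps) _ _ k (by simp; omega) hk]
        cases k with
        | zero => simp
        | succ k' => simp

theorem pvRowsC_chain (hcs : List Char) : ∀ (k : Nat) (cs : List Char)
    (prev : List (Int × List (String × String))) (i0 : Int),
    k < cs.length →
    (pvRowsC hcs cs prev i0).getD k [] =
      ((i0 + k), ([] : List (String × String))) ::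
        pvFillRowC (cs.getD k ' ') hcs ((prev :: pvRowsC hcs cs prev i0).getD k []) (i0 + k) [] := by
  intro k
  induction k with
  | zero =>
    intro cs prev i0 hk
    match cs with
    | c :: cs' => simp [pvRowsC]
  | succ k ih =>
    intro cs prev i0 hk
    match cs with
    | c :: cs' =>
      have hk' : k < cs'.length := by simpa using hk
      rw [show pvRowsC hcs (c :: cs') prev i0 =
        (((i0 : Int), ([] : List (String × String))) :: pvFillRowC c hcs prev i0 [])
          :: pvRowsC hcs cs' (((i0 : Int), ([] : List (String × String))) :: pvFillRowC c hcs prev i0 []) (i0 + 1) from rfl]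
      rw [List.getD_cons_succ, ih cs' _ (i0 + 1) hk']
      have : i0 + 1 + (k : Int) = i0 + ((k : Nat) + 1 : Nat) := by push_cast; ring
      rw [this]
      rfl

theorem pvTableA_succ (ref hyp : String) (i : Nat) (hi : i < ref.toList.length) :
    (pvTableA ref hyp).getD (i+1) [] =
      ((1:Int) + i) :: pvFillRowA (ref.toList.getD i ' ') hyp.toList
        ((pvTableA ref hyp).getD i []) ((1:Int) + i) := by
  simp only [pvTableA, List.getD_cons_succ]
  rw [pvRowsA_chain hyp.toList i ref.toList _ 1 hi]

theorem pvTableC_succ (ref hyp : String) (i : Nat) (hi : i < ref.toList.length) :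
    (pvTableC ref hyp).getD (i+1) [] =
      (((1:Int) + i), ([] : List (String × String))) ::
        pvFillRowC (ref.toList.getD i ' ') hyp.toList ((pvTableC ref hyp).getD i []) ((1:Int) + i) [] := by
  simp only [pvTableC, List.getD_cons_succ]
  rw [pvRowsC_chain hyp.toList i ref.toList _ 1 hi]

theorem pvTableA_row_len (ref hyp : String) : ∀ i, i ≤ ref.toList.length →
    ((pvTableA ref hyp).getD i []).length = hyp.toList.length + 1 := by
  intro i
  induction i with
  | zero => intro _; simp [pvTableA]
  | succ i ih =>
    intro hi
    have hi' : i < ref.toList.length := hi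
    rw [pvTableA_succ ref hyp i hi']
    simp only [List.length_cons]
    rw [pvFillRowA_length _ _ _ _ (le_of_eq (ih (le_of_lt hi')).symm)]

theorem pvTableC_fst (ref hyp : String) : ∀ i, i ≤ ref.toList.length →
    ((pvTableC ref hyp).getD i []).map Prod.fst = (pvTableA ref hyp).getD i [] := by
  intro i
  induction i with
  | zero =>
    intro _
    simp only [pvTableC, pvTableA, List.getD_cons_zero, List.map_map]
    rfl
  | succ i ih =>
    intro hi
    have hi' : i < ref.toList.length := hi
    rw [pvTableC_succ ref hyp i hi', pvTableA_succ ref hyp i hi']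
    simp only [List.map_cons]
    rw [pvFillRowC_fst, ih (le_of_lt hi')]

theorem pvValC (ref hyp : String) : ∀ i j, i ≤ ref.toList.length → j ≤ hyp.toList.length →
    (pvCellC (pvTableC ref hyp) i j).1 = pvDpA (pvTableA ref hyp) i j := by
  intro i j hi hj
  have hfst := pvTableC_fst ref hyp i hi
  have hlenB : ((pvTableC ref hyp).getD i []).length = hyp.toList.length + 1 := by
    have h1 : (((pvTableC ref hyp).getD i []).map Prod.fst).length
        = ((pvTableA ref hyp).getD i []).length := by rw [hfst]
    rw [List.length_map] at h1
    rw [h1, pvTableA_row_len ref hyp i hi]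
  have hj' : j < ((pvTableC ref hyp).getD i []).length := by omega
  simp only [pvDpA, pvCellC]
  rw [← hfst]
  generalize (pvTableC ref hyp).getD i [] = l at hj' ⊢
  simp [List.getD, List.getElem?_map, List.getElem?_eq_getElem hj']

theorem pvDpA_rec (ref hyp : String) : ∀ i j, i < ref.toList.length → j < hyp.toList.length →
    pvDpA (pvTableA ref hyp) (i+1) (j+1) =
      if ref.toList.getD i ' ' = hyp.toList.getD j ' ' then pvDpA (pvTableA ref hyp) i j
      else 1 + min (min (pvDpA (pvTableA ref hyp) i (j+1)) (pvDpA (pvTableA ref hyp) (i+1) j))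
            (pvDpA (pvTableA ref hyp) i j) := by
  intro i j hi hj
  have hlen : hyp.toList.length + 1 ≤ ((pvTableA ref hyp).getD i []).length :=
    le_of_eq (pvTableA_row_len ref hyp i (le_of_lt hi)).symm
  have h3 : (if j = 0 then ((1:Int) + i) else
      (pvFillRowA (ref.toList.getD i ' ') hyp.toList ((pvTableA ref hyp).getD i []) ((1:Int)+i)).getD (j-1) 0)
      = pvDpA (pvTableA ref hyp) (i+1) j := by
    cases j with
    | zero =>
      simp only [pvDpA]
      rw [pvTableA_succ ref hyp i hi]
      simp
    | succ k =>
      simp only [pvDpA]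
      rw [pvTableA_succ ref hyp i hi]
      simp
  have hstep : pvDpA (pvTableA ref hyp) (i+1) (j+1) =
      (pvFillRowA (ref.toList.getD i ' ') hyp.toList ((pvTableA ref hyp).getD i []) ((1:Int)+i)).getD j 0 := by
    simp only [pvDpA]
    rw [pvTableA_succ ref hyp i hi, List.getD_cons_succ]
  rw [hstep, pvFillRowA_getD _ _ _ _ j hlen hj, h3]
  rfl

theorem pvCellC_zero (ref hyp : String) (j : Nat) (hj : j ≤ hyp.toList.length) :
    (pvCellC (pvTableC ref hyp) 0 j).2 = [] := by
  have hj' : j < hyp.toList.length + 1 := Nat.lt_succ_of_le hj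
  simp [pvCellC, pvTableC, List.getD, List.getElem?_map]

theorem pvCellC_left0 (ref hyp : String) (i : Nat) (hi : i < ref.toList.length) :
    pvCellC (pvTableC ref hyp) (i+1) 0 = (((1:Int) + i), ([] : List (String × String))) := by
  simp only [pvCellC]
  rw [pvTableC_succ ref hyp i hi]
  rfl

theorem pvCellC_rec (ref hyp : String) : ∀ i j, i < ref.toList.length → j < hyp.toList.length →
    (pvCellC (pvTableC ref hyp) (i+1) (j+1)).2 =
      if ref.toList.getD i ' ' = hyp.toList.getD j ' ' then (pvCellC (pvTableC ref hyp) i j).2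
      else if pvDpA (pvTableA ref hyp) (i+1) (j+1) = pvDpA (pvTableA ref hyp) i j + 1 then
        (String.singleton (ref.toList.getD i ' '), String.singleton (hyp.toList.getD j ' ')) ::
          (pvCellC (pvTableC ref hyp) i j).2
      else if pvDpA (pvTableA ref hyp) (i+1) (j+1) = pvDpA (pvTableA ref hyp) i (j+1) + 1 then
        (pvCellC (pvTableC ref hyp) i (j+1)).2
      else (pvCellC (pvTableC ref hyp) (i+1) j).2 := by
  intro i j hi hj
  have hfst := pvTableC_fst ref hyp i (le_of_lt hi)
  have hlenB : hyp.toList.length + 1 ≤ ((pvTableC ref hyp).getD i []).length := by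
    have h1 : (((pvTableC ref hyp).getD i []).map Prod.fst).length
        = ((pvTableA ref hyp).getD i []).length := by rw [hfst]
    rw [List.length_map] at h1
    rw [h1, pvTableA_row_len ref hyp i (le_of_lt hi)]
  have hp0 : ((pvTableC ref hyp).getD i []).getD j (0,[]) = pvCellC (pvTableC ref hyp) i j := rfl
  have hp1 : ((pvTableC ref hyp).getD i []).getD (j+1) (0,[]) = pvCellC (pvTableC ref hyp) i (j+1) := rfl
  have hv0 : (pvCellC (pvTableC ref hyp) i j).1 = pvDpA (pvTableA ref hyp) i j :=
    pvValC ref hyp i j (le_of_lt hi) (le_of_lt hj)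
  have hv1 : (pvCellC (pvTableC ref hyp) i (j+1)).1 = pvDpA (pvTableA ref hyp) i (j+1) :=
    pvValC ref hyp i (j+1) (le_of_lt hi) hj
  have hlv : (if j = 0 then (((1:Int) + i), ([] : List (String × String))) else
      (pvFillRowC (ref.toList.getD i ' ') hyp.toList ((pvTableC ref hyp).getD i []) ((1:Int)+i) []).getD (j-1) (0,[]))
      = pvCellC (pvTableC ref hyp) (i+1) j := by
    cases j with
    | zero => rw [pvCellC_left0 ref hyp i hi]; rfl
    | succ k =>
      simp only [Nat.succ_ne_zero, if_false, Nat.add_sub_cancel]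
      simp only [pvCellC]
      rw [pvTableC_succ ref hyp i hi, List.getD_cons_succ]
  have hlvv : (pvCellC (pvTableC ref hyp) (i+1) j).1 = pvDpA (pvTableA ref hyp) (i+1) j :=
    pvValC ref hyp (i+1) j hi (le_of_lt hj)
  have hstep : pvCellC (pvTableC ref hyp) (i+1) (j+1) =
      (pvFillRowC (ref.toList.getD i ' ') hyp.toList ((pvTableC ref hyp).getD i []) ((1:Int)+i) []).getD j (0,[]) := by
    simp only [pvCellC]
    rw [pvTableC_succ ref hyp i hi, List.getD_cons_succ]
  have hgetD := pvFillRowC_getD (ref.toList.getD i ' ') hyp.toList ((pvTableC ref hyp).getD i [])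
      ((1:Int)+i) [] j hlenB hj
  -- rewrite the "left" occurrences in hgetD to pvCellC (i+1) j
  have hleft1 : (if j = 0 then ((1:Int) + i) else
      ((pvFillRowC (ref.toList.getD i ' ') hyp.toList ((pvTableC ref hyp).getD i []) ((1:Int)+i) []).getD (j-1) (0,[])).1)
      = pvDpA (pvTableA ref hyp) (i+1) j := by
    rw [← hlvv, ← hlv]
    cases j with
    | zero => simp
    | succ k => simp
  have hleft2 : (if j = 0 then ([] : List (String × String)) else
      ((pvFillRowC (ref.toList.getD i ' ') hyp.toList ((pvTableC ref hyp).getD i []) ((1:Int)+i) []).getD (j-1) (0,[])).2)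
      = (pvCellC (pvTableC ref hyp) (i+1) j).2 := by
    rw [← hlv]
    cases j with
    | zero => simp
    | succ k => simp
  by_cases hc : ref.toList.getD i ' ' = hyp.toList.getD j ' '
  · rw [if_pos hc]
    rw [hstep, hgetD, if_pos hc, hp0]
  · have hrec := pvDpA_rec ref hyp i j hi hj
    rw [if_neg hc] at hrec
    rw [if_neg hc, hstep, hgetD, if_neg hc, hp0, hp1, hleft1, hv0, hv1, ← hrec, hleft2]

theorem pvTrace_foldC (ref hyp : String) : ∀ (N i j : Nat) (d : PySem.Dict (String × String) Int),
    i + j ≤ N → i ≤ ref.toList.length → j ≤ hyp.toList.length →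
    pvTraceA ref.toList hyp.toList (pvTableA ref hyp) i j d =
      (pvCellC (pvTableC ref hyp) i j).2.foldl (fun a p => a.insert p (a.getD p 0 + 1)) d := by
  intro N
  induction N with
  | zero =>
    intro i j d hN hi hj
    have hi0 : i = 0 := by omega
    have hj0 : j = 0 := by omega
    subst hi0; subst hj0
    rw [pvCellC_zero ref hyp 0 (Nat.zero_le _)]
    simp [pvTraceA]
  | succ N ih =>
    intro i j d hN hi hj
    match i, j with
    | 0, j =>
      rw [pvCellC_zero ref hyp j hj]
      simp [pvTraceA]
    | i + 1, 0 =>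
      have : (pvCellC (pvTableC ref hyp) (i+1) 0).2 = [] := by
        rw [pvCellC_left0 ref hyp i hi]
      rw [this]
      simp [pvTraceA]
    | i + 1, j + 1 =>
      have hi' : i < ref.toList.length := hi
      have hj' : j < hyp.toList.length := hj
      rw [pvTraceA, pvCellC_rec ref hyp i j hi' hj']
      by_cases hc : ref.toList.getD i ' ' = hyp.toList.getD j ' '
      · have hc' : ref.toList[i]?.getD ' ' = hyp.toList[j]?.getD ' ' := hc
        rw [if_pos hc]
        norm_num
        rw [if_pos hc']
        exact ih i j d (by omega) (le_of_lt hi') (le_of_lt hj')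
      · have hc' : ¬ (ref.toList[i]?.getD ' ' = hyp.toList[j]?.getD ' ') := hc
        rw [if_neg hc]
        by_cases h1 : pvDpA (pvTableA ref hyp) (i+1) (j+1) = pvDpA (pvTableA ref hyp) i j + 1
        · rw [if_pos h1]
          norm_num
          rw [if_neg hc', if_pos h1]
          rw [List.foldl_cons]
          exact ih i j _ (by omega) (le_of_lt hi') (le_of_lt hj')
        · rw [if_neg h1]
          by_cases h2 : pvDpA (pvTableA ref hyp) (i+1) (j+1) = pvDpA (pvTableA ref hyp) i (j+1) + 1
          · rw [if_pos h2]
            norm_num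
            rw [if_neg hc', if_neg h1, if_pos h2]
            exact ih i (j+1) d (by omega) (le_of_lt hi') hj'
          · rw [if_neg h2]
            norm_num
            rw [if_neg hc', if_neg h1, if_neg h2]
            exact ih (i+1) j d (by omega) hi' (le_of_lt hj')

-- ===== VERDICT (by name: the statement is the Claim_ definition above) =====
theorem char_substitutions_py_spec : Claim_equal_char_substitutions_py := by
  intro ref hyp _
  show char_substitutions_py ref hyp = char_substitutions_py_alt ref hyp
  exact congrArg (List.map _) (congrArg PySem.Dict.items
    (pvTrace_foldC ref hyp (ref.toList.length + hyp.toList.length) _ _ _ le_rfl le_rfl le_rfl))
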